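-- pv_equiv track=rewrite | github.com/MrCsabaToth/IK | repractice1/lexico_order.py | solve
-- ===== SOURCE A (Python) =====
-- def solve(arr):
--     sol = dict()
--     for elem in arr:
--         vals = elem.split(" ")
--         if vals[0] not in sol:
--             sol[vals[0]] = [1, vals[1]]
--         else:
--             entry = sol[vals[0]]
--             entry[0] += 1
--             if entry[1] < vals[1]:
--                 entry[1] = vals[1]
--
--     return ["{}:{},{}".format(key, val[0], val[1]) for key,val in iter(sol.items())]
-- ===== SOURCE B (Python) =====
-- def solve(arr):
--     pairs = [e.split(" ") for e in arr]
--     keys = []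
--     for p in pairs:
--         if p[0] not in keys:
--             keys.append(p[0])
--     out = []
--     for k in keys:
--         vs = [p[1] for p in pairs if p[0] == k]
--         out.append("{}:{},{}".format(k, len(vs), max(vs)))
--     return out
-- ===== Notes on version B (the rewrite author's own statement) =====
-- stated objective: alternative
-- what changed: B drops A's dict of streamed (count, running-max) state entirely: it splits all elements once, collects the distinct keys in first-seen order into a plain list, and then for each key re-scans the pair list (filter) to compute len and max at output time.
import Mathlib
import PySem

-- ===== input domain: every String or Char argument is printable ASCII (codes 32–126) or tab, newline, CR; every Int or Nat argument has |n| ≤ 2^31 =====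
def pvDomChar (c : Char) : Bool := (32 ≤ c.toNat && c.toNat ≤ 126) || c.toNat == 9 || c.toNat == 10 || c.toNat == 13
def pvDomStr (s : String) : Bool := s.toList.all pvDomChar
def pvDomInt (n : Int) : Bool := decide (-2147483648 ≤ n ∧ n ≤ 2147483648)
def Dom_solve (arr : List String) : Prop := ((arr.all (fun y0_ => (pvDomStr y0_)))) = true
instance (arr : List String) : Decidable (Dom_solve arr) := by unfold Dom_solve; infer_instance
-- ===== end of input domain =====

-- B replaces A's dict of streamed per-key (count, running-max) state by two staged passes with
-- no dict: collect distinct keys in first-seen order, then per key filter the split pairs and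
-- take len/max; alternative decomposition, same results.

-- ===== PORT A =====
-- one iteration of A's loop: split, then update the (count, max) entry in place
def solveStep (sol : PySem.Dict String (Int × String)) (elem : String) :
    PySem.Dict String (Int × String) :=
  match PySem.Str.split? elem " " with
  | none => sol  -- unreachable: the separator is " " ≠ ""
  | some vals =>
    match PySem.List.pyGet? vals 0, PySem.List.pyGet? vals 1 with
    | some k, some v =>
      match sol.get? k with
      | none => sol.insert k (1, v)
      | some entry => sol.insert k (entry.1 + 1, if entry.2 < v then v else entry.2)
    | _, _ => sol  -- Python raises IndexError here (no second field); excluded by Pre_solve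

def solve (arr : List String) : List String :=
  (arr.foldl solveStep PySem.Dict.empty).items.map
    (fun kv => kv.1 ++ ":" ++ PySem.Int.toStr kv.2.1 ++ "," ++ kv.2.2)

-- ===== PORT B =====
-- pairs = [e.split(" ") for e in arr]   (split(" ") with a nonempty separator never fails)
def pvPairs (arr : List String) : List (List String) :=
  arr.map (fun e => (PySem.Str.split? e " ").getD [])

-- p[0]: total in Python because split(" ") is never empty; p[1] would raise IndexError on a
-- one-field element — those inputs are excluded by Pre_solve, the default is never observed.
def pvKey (p : List String) : String := (PySem.List.pyGet? p 0).getD ""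
def pvVal (p : List String) : String := (PySem.List.pyGet? p 1).getD ""

-- the first loop of Source B: keys in first-seen order
def pvFirstKeys (pairs : List (List String)) : List String :=
  pairs.foldl (fun ks p => if pvKey p ∈ ks then ks else ks ++ [pvKey p]) []

-- the inner comprehension of Source B: [p[1] for p in pairs if p[0] == k]
def pvVals (pairs : List (List String)) (k : String) : List String :=
  (pairs.filter (fun p => pvKey p == k)).map pvVal

def solve_alt (arr : List String) : List String :=
  (pvFirstKeys (pvPairs arr)).map (fun k =>
    k ++ ":" ++ PySem.Int.toStr ((pvVals (pvPairs arr) k).length : Int) ++ ","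
      ++ ((PySem.List.max? (pvVals (pvPairs arr) k) id).getD ""))

-- ===== PRECONDITION & SPEC =====
-- Pre_ excludes lists with an element whose split(" ") has fewer than two fields: there Python A
-- raises IndexError on vals[1].
def Pre_solve (arr : List String) : Prop :=
  ∀ s ∈ arr, 2 ≤ ((PySem.Str.split? s " ").getD []).length
instance (arr : List String) : Decidable (Pre_solve arr) := by unfold Pre_solve; infer_instance
def pvWitness_solve : List String := ["a 1", "b 2", "a 3"]

def Spec_solve (arr : List String) (out : List String) : Prop := out = solve_alt arr
instance (arr : List String) (out : List String) : Decidable (Spec_solve arr out) := by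
  unfold Spec_solve; infer_instance

-- ===== CLAIM (what is proved, stated in full; the proofs are below) =====
def Claim_equal_solve : Prop :=
  ∀ (arr : List String), Dom_solve arr → Pre_solve arr → Spec_solve arr (solve arr)

-- ===== LEMMAS AND PROOFS =====

-- the aggregate B computes for one key
def pvAgg (pairs : List (List String)) (k : String) : Int × String :=
  (((pvVals pairs k).length : Int), (PySem.List.max? (pvVals pairs k) id).getD "")

lemma max?_isSome_of_ne_nil (vs : List String) (h : vs ≠ []) :
    ∃ m, PySem.List.max? vs id = some m := by
  cases vs with
  | nil => exact absurd rfl h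
  | cons x xs =>
    simp only [PySem.List.max?, List.foldl_cons]
    clear h
    induction xs generalizing x with
    | nil => exact ⟨x, rfl⟩
    | cons y ys ih =>
      simp only [List.foldl_cons]
      by_cases hlt : (x : String) < y <;> simp only [id, hlt, if_pos]
      · exact ih y
      · exact ih x

lemma max?_append_singleton_some (vs : List String) (v m : String)
    (h : PySem.List.max? vs id = some m) :
    PySem.List.max? (vs ++ [v]) id = some (if m < v then v else m) := by
  unfold PySem.List.max? at h ⊢
  rw [List.foldl_append, h]
  simp only [List.foldl_cons, List.foldl_nil, id_eq]
  split <;> rfl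

lemma pyGet?_two (l : List String) (h : 2 ≤ l.length) :
    ∃ k v, PySem.List.pyGet? l 0 = some k ∧ PySem.List.pyGet? l 1 = some v := by
  match l, h with
  | a :: b :: t, _ =>
    have h0 : (0:Int) ≤ (t.length:Int) + 1 := by positivity
    refine ⟨a, b, ?_, ?_⟩ <;> simp [PySem.List.pyGet?, PySem.List.pyIdx?, h0]

lemma mem_firstKeys (pairs : List (List String)) (k : String) :
    k ∈ pvFirstKeys pairs ↔ k ∈ pairs.map pvKey := by
  unfold pvFirstKeys
  suffices h : ∀ ks : List String,
      k ∈ pairs.foldl (fun ks p => if pvKey p ∈ ks then ks else ks ++ [pvKey p]) ks ↔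
        k ∈ ks ∨ k ∈ pairs.map pvKey by
    simpa using h []
  induction pairs with
  | nil => simp
  | cons p ps ih =>
    intro ks
    simp only [List.foldl_cons, List.map_cons, List.mem_cons]
    by_cases hm : pvKey p ∈ ks
    · rw [if_pos hm, ih]
      constructor
      · rintro (h | h)
        · exact Or.inl h
        · exact Or.inr (Or.inr h)
      · rintro (h | h | h)
        · exact Or.inl h
        · exact Or.inl (h ▸ hm)
        · exact Or.inr h
    · rw [if_neg hm, ih]
      simp only [List.mem_append, List.mem_singleton]
      tauto

lemma nodup_firstKeys (pairs : List (List String)) : (pvFirstKeys pairs).Nodup := by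
  unfold pvFirstKeys
  suffices h : ∀ ks : List String, ks.Nodup →
      (pairs.foldl (fun ks p => if pvKey p ∈ ks then ks else ks ++ [pvKey p]) ks).Nodup by
    exact h [] List.nodup_nil
  induction pairs with
  | nil => exact fun ks h => h
  | cons p ps ih =>
    intro ks hks
    simp only [List.foldl_cons]
    by_cases hm : pvKey p ∈ ks
    · rw [if_pos hm]; exact ih ks hks
    · rw [if_neg hm]
      refine ih _ ?_
      rw [List.nodup_append]
      refine ⟨hks, List.nodup_singleton _, ?_⟩
      intro a ha b hb he
      subst he
      rw [List.mem_singleton] at hb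
      subst hb
      exact hm ha

lemma firstKeys_append_singleton (pairs : List (List String)) (p : List String) :
    pvFirstKeys (pairs ++ [p]) =
      if pvKey p ∈ pvFirstKeys pairs then pvFirstKeys pairs
      else pvFirstKeys pairs ++ [pvKey p] := by
  simp [pvFirstKeys, List.foldl_append]

lemma vals_append_singleton (pairs : List (List String)) (p : List String) (k : String) :
    pvVals (pairs ++ [p]) k =
      pvVals pairs k ++ (if pvKey p == k then [pvVal p] else []) := by
  simp only [pvVals, List.filter_append, List.map_append]
  congr 1
  by_cases h : pvKey p == k <;> simp [List.filter, h]

lemma vals_nil_of_not_mem (pairs : List (List String)) (k : String)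
    (h : k ∉ pvFirstKeys pairs) : pvVals pairs k = [] := by
  rw [mem_firstKeys] at h
  unfold pvVals
  rw [List.filter_eq_nil_iff.mpr, List.map_nil]
  intro p hp hk
  exact h (List.mem_map.mpr ⟨p, hp, eq_of_beq hk⟩)

lemma vals_ne_nil_of_mem (pairs : List (List String)) (k : String)
    (h : k ∈ pvFirstKeys pairs) : pvVals pairs k ≠ [] := by
  rw [mem_firstKeys] at h
  obtain ⟨p, hp, hk⟩ := List.mem_map.mp h
  unfold pvVals
  intro hnil
  rw [List.map_eq_nil_iff, List.filter_eq_nil_iff] at hnil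
  exact hnil p hp (by simp [hk])

-- the main loop correspondence: A's dict after the fold holds exactly B's per-key aggregates,
-- listed in first-seen key order
lemma loop_items (arr : List String)
    (hPre : ∀ s ∈ arr, 2 ≤ ((PySem.Str.split? s " ").getD []).length) :
    (arr.foldl solveStep PySem.Dict.empty).items
      = (pvFirstKeys (pvPairs arr)).map (fun k => (k, pvAgg (pvPairs arr) k)) := by
  induction arr using List.reverseRecOn with
  | nil => simp [pvPairs, pvFirstKeys, PySem.Dict.empty]
  | append_singleton xs x ih =>
    have hx : 2 ≤ ((PySem.Str.split? x " ").getD []).length :=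
      hPre x (List.mem_append_right xs (List.mem_singleton.mpr rfl))
    have hxs : ∀ s ∈ xs, 2 ≤ ((PySem.Str.split? s " ").getD []).length :=
      fun s hs => hPre s (List.mem_append_left _ hs)
    set p := (PySem.Str.split? x " ").getD [] with hp
    obtain ⟨k, v, hk0, hk1⟩ := pyGet?_two p hx
    have hkey : pvKey p = k := by simp [pvKey, hk0]
    have hval : pvVal p = v := by simp [pvVal, hk1]
    have hsplit : ∃ vals, PySem.Str.split? x " " = some vals ∧ vals = p := by
      cases hs : PySem.Str.split? x " " with
      | none => rw [hp, hs] at hx; simp at hx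
      | some vals => exact ⟨vals, rfl, by rw [hp, hs]; rfl⟩
    obtain ⟨vals, hs, hvp⟩ := hsplit
    have hpairs : pvPairs (xs ++ [x]) = pvPairs xs ++ [p] := by
      simp [pvPairs, hp]
    set dA := xs.foldl solveStep PySem.Dict.empty with hdA
    set keys := pvFirstKeys (pvPairs xs) with hkeys
    have hfold : (xs ++ [x]).foldl solveStep PySem.Dict.empty = solveStep dA x := by
      simp [List.foldl_append, hdA]
    have hitems := ih hxs
    have hdAkeys : dA.keys = keys := by
      simp only [PySem.Dict.keys, hitems, List.map_map]
      rw [show ((fun x : String × (Int × String) => x.1) ∘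
            fun k => (k, pvAgg (pvPairs xs) k)) = id from rfl, List.map_id]
    have hnd : dA.keys.Nodup := by rw [hdAkeys]; exact nodup_firstKeys _
    rw [hfold, hpairs, firstKeys_append_singleton, hkey]
    by_cases hmem : k ∈ keys
    · -- existing key: A updates in place, B's aggregates change only at k
      have hget : dA.get? k = some (pvAgg (pvPairs xs) k) := by
        apply PySem.Dict.get?_of_mem_items dA _ hnd
        rw [hitems]
        exact List.mem_map.mpr ⟨k, hmem, rfl⟩
      obtain ⟨m, hm⟩ := max?_isSome_of_ne_nil _ (vals_ne_nil_of_mem _ _ hmem)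
      rw [hvp] at hs
      have hstep : solveStep dA x
          = dA.insert k ((((pvVals (pvPairs xs) k).length : Int)) + 1, if m < v then v else m) := by
        simp [solveStep, hs, hk0, hk1, hget, pvAgg, hm]
      have hcA : dA.contains k = true := by
        rw [PySem.Dict.contains_eq_isSome_get?, hget]; rfl
      rw [hstep, if_pos (show k ∈ pvFirstKeys (pvPairs xs) from hmem),
        PySem.Dict.items_insert_of_contains _ _ hcA, hitems, List.map_map]
      apply List.map_congr_left
      intro k' hk'
      by_cases hek : k' = k
      · subst hek
        simp only [Function.comp_apply, beq_self_eq_true, if_pos]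
        have : pvVals (pvPairs xs ++ [p]) k' = pvVals (pvPairs xs) k' ++ [v] := by
          rw [vals_append_singleton, hkey, hval]; simp
        simp [pvAgg, this, max?_append_singleton_some _ v m hm]
      · have : pvVals (pvPairs xs ++ [p]) k' = pvVals (pvPairs xs) k' := by
          rw [vals_append_singleton, hkey]
          simp [beq_eq_false_iff_ne.mpr (Ne.symm hek)]
        simp [pvAgg, this, hek]
    · -- fresh key: A appends (1, v), B appends key k whose value list is exactly [v]
      have hget : dA.get? k = none := by
        rw [PySem.Dict.get?_eq_none_iff_not_mem_keys, hdAkeys]; exact hmem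
      rw [hvp] at hs
      have hstep : solveStep dA x = dA.insert k (1, v) := by
        simp [solveStep, hs, hk0, hk1, hget]
      have hcA : dA.contains k = false := by
        rw [PySem.Dict.contains_eq_isSome_get?, hget]; rfl
      rw [hstep, if_neg (show ¬ k ∈ pvFirstKeys (pvPairs xs) from hmem),
        PySem.Dict.items_insert_of_not_contains _ _ hcA, hitems, List.map_append]
      congr 1
      · apply List.map_congr_left
        intro k' hk'
        have hek : k' ≠ k := fun h => hmem (hkeys ▸ h ▸ hk')
        have : pvVals (pvPairs xs ++ [p]) k' = pvVals (pvPairs xs) k' := by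
          rw [vals_append_singleton, hkey]
          simp [beq_eq_false_iff_ne.mpr (Ne.symm hek)]
        simp [pvAgg, this]
      · have hvnil : pvVals (pvPairs xs) k = [] := vals_nil_of_not_mem _ _ hmem
        have : pvVals (pvPairs xs ++ [p]) k = [v] := by
          rw [vals_append_singleton, hkey, hval, hvnil]; simp
        simp [pvAgg, this, PySem.List.max?]

-- ===== VERDICT (by name: the statement is the Claim_ definition above) =====
theorem solve_spec : Claim_equal_solve := by
  intro arr _ hPre
  unfold Spec_solve solve solve_alt
  rw [loop_items arr hPre, List.map_map]
  apply List.map_congr_left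
  intro k _
  simp [pvAgg]
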